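-- pv_equiv track=rewrite | github.com/drachelehre/staticsite | src/markdown_block.py | markdown_to_block
-- ===== SOURCE A (Python) =====
-- block_type_para = "paragraph"
--
-- block_type_head = "heading"
--
-- block_type_code = "code"
--
-- block_type_quote = "quote"
--
-- block_type_unordered = "unordered_list"
--
-- block_type_ordered = "ordered_list"
--
-- def markdown_to_block(markdown):
--     lines = markdown.strip().split('\n')
--     blocks = []
--     current_block = []
--     current_type = None
--
--     def add_current_block(type):
--         if current_block:
--             blocks.append((type, '\n'.join(current_block)))
--             current_block.clear()
--
--     for line in lines:
--         line_type = block_to_block_type(line)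
--
--         if line_type != current_type:
--             add_current_block(current_type)
--             current_type = line_type
--
--         if line.strip():  # Ignore empty lines
--             current_block.append(line)
--
--     add_current_block(current_type)
--     return blocks
--
-- def block_to_block_type(block):
--     stripped = block.strip()
--
--     if stripped.startswith('#'):
--         return block_type_head
--     elif stripped.startswith('```'):
--         return block_type_code
--     elif stripped.startswith('>'):
--         return block_type_quote
--     elif stripped.startswith(('*', '-')):
--         return block_type_unordered
--     elif len(stripped) > 1 and stripped[0].isdigit() and stripped[1] == '.':
--         return block_type_ordered
--     else:
--         return block_type_para
-- ===== SOURCE B (Python) =====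
-- def block_to_block_type(block):
--     stripped = block.strip()
--
--     if stripped.startswith('#'):
--         return "heading"
--     elif stripped.startswith('```'):
--         return "code"
--     elif stripped.startswith('>'):
--         return "quote"
--     elif stripped.startswith(('*', '-')):
--         return "unordered_list"
--     elif len(stripped) > 1 and stripped[0].isdigit() and stripped[1] == '.':
--         return "ordered_list"
--     else:
--         return "paragraph"
--
-- def markdown_to_block(markdown):
--     # span-based grouping: find each maximal run of equally-typed lines, keep its non-empty lines
--     lines = markdown.strip().split('\n')
--     blocks = []
--     i, n = 0, len(lines)
--     while i < n:
--         t = block_to_block_type(lines[i])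
--         j = i + 1
--         while j < n and block_to_block_type(lines[j]) == t:
--             j += 1
--         kept = [l for l in lines[i:j] if l.strip()]
--         if kept:
--             blocks.append((t, '\n'.join(kept)))
--         i = j
--     return blocks
-- ===== Notes on version B (the rewrite author's own statement) =====
-- stated objective: idiomatic
-- what changed: Replaces A's mutable state machine (current_block/current_type with a nested flush closure) by span-based grouping: each maximal run of consecutive equally-typed lines is located with an inner scan, its non-empty lines filtered and joined in one step.
import Mathlib
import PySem

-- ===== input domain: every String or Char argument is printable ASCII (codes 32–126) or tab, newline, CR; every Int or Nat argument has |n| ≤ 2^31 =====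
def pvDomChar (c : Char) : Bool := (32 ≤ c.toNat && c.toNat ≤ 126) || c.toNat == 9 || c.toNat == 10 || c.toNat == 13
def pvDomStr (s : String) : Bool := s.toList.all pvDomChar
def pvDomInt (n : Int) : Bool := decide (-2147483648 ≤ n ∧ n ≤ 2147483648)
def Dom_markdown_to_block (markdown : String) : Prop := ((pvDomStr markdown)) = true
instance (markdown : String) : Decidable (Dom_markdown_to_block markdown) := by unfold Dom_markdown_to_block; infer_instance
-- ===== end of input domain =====

-- B replaces A's mutable state machine with span-based grouping of equally-typed line runs (idiomatic; same cost).

-- ===== PORT A =====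
-- s.split('\n'): split? is total here since the separator is nonempty
def pyLines (s : String) : List String := (PySem.Str.split? s "\n").getD []

-- shared module helper block_to_block_type
def blockType (block : String) : String :=
  let stripped := PySem.Str.strip block
  if PySem.Str.startswith stripped "#" then "heading"
  else if PySem.Str.startswith stripped "```" then "code"
  else if PySem.Str.startswith stripped ">" then "quote"
  else if PySem.Str.startswith stripped "*" || PySem.Str.startswith stripped "-" then "unordered_list"
  else if PySem.Str.len stripped > 1
       && (match PySem.Str.pyGet? stripped 0 with | some c => PySem.Chars.isdigit c | none => false)
       && (PySem.Str.pyGet? stripped 1 == some '.') then "ordered_list"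
  else "paragraph"

-- add_current_block: in the Python the appended type is never None (current_block nonempty ⇒ a type was set), so getD "" is unreachable filler
def addCurrent (blocks : List (String × String)) (cur : List String) (ty : Option String) :
    List (String × String) :=
  if cur ≠ [] then blocks ++ [(ty.getD "", PySem.Str.join "\n" cur)] else blocks

-- one iteration of A's for-loop over (blocks, current_block, current_type)
def stepA (st : List (String × String) × List String × Option String) (line : String) :
    List (String × String) × List String × Option String :=
  let lt := blockType line
  let st' := if some lt ≠ st.2.2 then (addCurrent st.1 st.2.1 st.2.2, ([] : List String), some lt) else st
  if PySem.Str.strip line ≠ "" then (st'.1, st'.2.1 ++ [line], st'.2.2) else st'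

def markdown_to_block (markdown : String) : List (String × String) :=
  let lines := pyLines (PySem.Str.strip markdown)
  let st := lines.foldl stepA
    (([] : List (String × String)), ([] : List String), (none : Option String))
  addCurrent st.1 st.2.1 st.2.2

-- ===== PORT B =====
-- B's outer loop: each iteration consumes one maximal run of equally-typed lines
def altGo : List String → List (String × String)
  | [] => []
  | l :: ls =>
    let t := blockType l
    let grp := ls.takeWhile (fun x => blockType x == t)
    let rest := ls.dropWhile (fun x => blockType x == t)
    let kept := (l :: grp).filter (fun x => PySem.Str.strip x ≠ "")
    (if kept ≠ [] then [(t, PySem.Str.join "\n" kept)] else []) ++ altGo rest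
termination_by ls => ls.length
decreasing_by
  calc (ls.dropWhile (fun x => blockType x == t)).length ≤ ls.length := List.length_dropWhile_le _ _
    _ < (l :: ls).length := by simp

def markdown_to_block_alt (markdown : String) : List (String × String) :=
  altGo (pyLines (PySem.Str.strip markdown))

-- ===== PRECONDITION & SPEC =====
def Spec_markdown_to_block (markdown : String) (out : List (String × String)) : Prop := out = markdown_to_block_alt markdown
instance (markdown : String) (out : List (String × String)) : Decidable (Spec_markdown_to_block markdown out) := by unfold Spec_markdown_to_block; infer_instance

-- ===== CLAIM (what is proved, stated in full; the proofs are below) =====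
def Claim_equal_markdown_to_block : Prop := ∀ (markdown : String), Dom_markdown_to_block markdown → Spec_markdown_to_block markdown (markdown_to_block markdown)

-- ===== LEMMAS AND PROOFS =====

-- B's outer loop with a carried group: the current run's type t and already-kept lines cur
def goC (t : String) (cur : List String) (lines : List String) : List (String × String) :=
  let kept := cur ++ (lines.takeWhile (fun x => blockType x == t)).filter (fun x => PySem.Str.strip x ≠ "")
  (if kept ≠ [] then [(t, PySem.Str.join "\n" kept)] else [])
    ++ altGo (lines.dropWhile (fun x => blockType x == t))

lemma altGo_cons (l : String) (ls : List String) :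
    altGo (l :: ls) = goC (blockType l) ((if PySem.Str.strip l ≠ "" then [l] else [])) ls := by
  rw [altGo, goC]
  simp only [List.filter_cons]
  split_ifs <;> simp_all

lemma stepA_some (blocks : List (String × String)) (cur : List String) (t : String) (line : String) :
    stepA (blocks, cur, some t) line =
      if blockType line = t then
        (blocks, (if PySem.Str.strip line ≠ "" then cur ++ [line] else cur), some t)
      else
        (addCurrent blocks cur (some t), (if PySem.Str.strip line ≠ "" then [line] else []),
          some (blockType line)) := by
  simp only [stepA]
  split_ifs <;> simp_all

lemma foldA (lines : List String) (blocks : List (String × String)) (cur : List String) (t : String) :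
    addCurrent (lines.foldl stepA (blocks, cur, some t)).1
      (lines.foldl stepA (blocks, cur, some t)).2.1
      (lines.foldl stepA (blocks, cur, some t)).2.2
    = blocks ++ goC t cur lines := by
  induction lines generalizing blocks cur t with
  | nil =>
    simp only [List.foldl_nil, goC, List.takeWhile_nil, List.dropWhile_nil,
      List.filter_nil, List.append_nil, addCurrent]
    rw [altGo]
    split_ifs <;> simp_all
  | cons l ls ih =>
    rw [List.foldl_cons, stepA_some]
    by_cases ht : blockType l = t
    · -- same type: no flush, maybe append the line if non-empty
      rw [if_pos ht, ih, goC, goC]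
      simp only [List.takeWhile_cons, List.dropWhile_cons, ht, beq_self_eq_true, if_pos,
        List.filter_cons]
      by_cases hs : PySem.Str.strip l ≠ "" <;> simp [hs]
    · -- new type: flush the finished block, start a fresh group
      rw [if_neg ht, ih, ← altGo_cons]
      conv_rhs => rw [goC]
      simp only [List.takeWhile_cons, List.dropWhile_cons,
        (by simpa using ht : (blockType l == t) = false), Bool.false_eq_true, addCurrent]
      split_ifs <;> simp_all

lemma main_eq (lines : List String) :
    addCurrent (lines.foldl stepA ([], [], none)).1
      (lines.foldl stepA ([], [], none)).2.1
      (lines.foldl stepA ([], [], none)).2.2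
    = altGo lines := by
  cases lines with
  | nil => rw [altGo]; simp [addCurrent]
  | cons l ls =>
    have h1 : stepA ([], [], none) l
        = ([], (if PySem.Str.strip l ≠ "" then [l] else []), some (blockType l)) := by
      simp only [stepA, addCurrent]
      split_ifs <;> simp_all
    rw [List.foldl_cons, h1, foldA, altGo_cons]
    simp

-- ===== VERDICT (by name: the statement is the Claim_ definition above) =====
theorem markdown_to_block_spec : Claim_equal_markdown_to_block := by
  intro markdown _
  unfold Spec_markdown_to_block markdown_to_block markdown_to_block_alt
  exact main_eq _
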